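-- pv_equiv track=rewrite | github.com/bh2005/CMK-exchange | special_agents/ExtremeCloud-XIQ/source/local/lib/python3/cmk_addons/plugins/xiq/agent_based/check_summary.py | _count_by_function
-- ===== SOURCE A (Python) =====
-- from typing import Any, List, Optional, Tuple, Mapping, Iterable
--
-- def _count_by_function(inv_rows: Optional[List[List[str]]]) -> Mapping[str, int]:
--     """
--     Count devices by 'device_function' column in the inventory section.
--     AP / SW / MISC + TOTAL.
--     """
--     counts = {"AP": 0, "SW": 0, "MISC": 0, "TOTAL": 0}
--     if not inv_rows:
--         return counts
--
--     for row in inv_rows: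
--         dev_fun = (row[8] if len(row) > 8 else "") or ""
--         dev_fun_u = str(dev_fun).upper()
--         if "AP" in dev_fun_u:
--             counts["AP"] += 1
--         elif "SW" in dev_fun_u:
--             counts["SW"] += 1
--         else:
--             counts["MISC"] += 1
--         counts["TOTAL"] += 1
--     return counts
-- ===== SOURCE B (Python) =====
-- def _count_by_function(inv_rows):
--     rows = inv_rows or []
--     funs = [((row[8] if len(row) > 8 else "") or "").upper() for row in rows]
--     total = len(funs)
--     ap = sum(1 for f in funs if "AP" in f)
--     sw = sum(1 for f in funs if "SW" in f and "AP" not in f)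
--     return {"AP": ap, "SW": sw, "MISC": total - ap - sw, "TOTAL": total}
-- ===== Notes on version B (the rewrite author's own statement) =====
-- stated objective: alternative
-- what changed: Replaces the single fold over a mutable counts dict (elif chain updating four keys) by derived aggregates: a list of uppercased function strings built once, AP and SW as filter counts (SW excluding AP to mirror the elif precedence), MISC and TOTAL derived as len and subtraction.
import Mathlib
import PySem

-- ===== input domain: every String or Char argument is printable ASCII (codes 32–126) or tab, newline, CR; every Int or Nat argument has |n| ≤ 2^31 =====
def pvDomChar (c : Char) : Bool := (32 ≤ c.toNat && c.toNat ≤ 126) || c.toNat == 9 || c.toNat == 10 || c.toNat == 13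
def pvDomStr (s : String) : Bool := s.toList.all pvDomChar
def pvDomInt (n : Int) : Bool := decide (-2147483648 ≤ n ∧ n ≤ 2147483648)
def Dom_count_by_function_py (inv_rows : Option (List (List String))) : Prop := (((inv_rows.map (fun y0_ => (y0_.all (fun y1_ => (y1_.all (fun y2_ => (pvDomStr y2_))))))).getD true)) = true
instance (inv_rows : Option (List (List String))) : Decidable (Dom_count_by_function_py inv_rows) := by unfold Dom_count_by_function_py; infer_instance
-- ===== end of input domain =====

-- B computes the same counts by derived aggregates (filter counts + subtraction for MISC) instead of A's single fold over a mutable dict; alternative decomposition, same cost.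

-- ===== PORT A =====
-- dev_fun_u of a row: (row[8] if len(row) > 8 else "") or "", uppercased ('or ""' is the identity here since "" or "" == "")
def pvDevFunU (row : List String) : String :=
  PySem.Str.upper (if 8 < row.length then ((PySem.List.pyGet? row 8).getD "") else "")

-- the loop body of A's for-loop
def pvStepA (c : PySem.Dict String Int) (row : List String) : PySem.Dict String Int :=
  let u := pvDevFunU row
  let c :=
    if PySem.Str.isIn "AP" u then c.insert "AP" (c.getD "AP" 0 + 1)
    else if PySem.Str.isIn "SW" u then c.insert "SW" (c.getD "SW" 0 + 1)
    else c.insert "MISC" (c.getD "MISC" 0 + 1)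
  c.insert "TOTAL" (c.getD "TOTAL" 0 + 1)

def count_by_function_py (inv_rows : Option (List (List String))) : List (String × Int) :=
  let counts : PySem.Dict String Int := PySem.Dict.mk [("AP", 0), ("SW", 0), ("MISC", 0), ("TOTAL", 0)]
  match inv_rows with
  | none => counts.items
  | some rows =>
    if rows = [] then counts.items
    else (rows.foldl pvStepA counts).items

-- ===== PORT B =====
def count_by_function_py_alt (inv_rows : Option (List (List String))) : List (String × Int) :=
  let rows := inv_rows.getD []
  let funs := rows.map (fun row => PySem.Str.upper (((PySem.List.pyGet? row 8).getD "")))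
  let total : Int := funs.length
  let ap : Int := (funs.filter (fun f => PySem.Str.isIn "AP" f)).length
  let sw : Int := (funs.filter (fun f => PySem.Str.isIn "SW" f && !PySem.Str.isIn "AP" f)).length
  [("AP", ap), ("SW", sw), ("MISC", total - ap - sw), ("TOTAL", total)]

-- ===== PRECONDITION & SPEC =====
def Spec_count_by_function_py (inv_rows : Option (List (List String))) (out : List (String × Int)) : Prop := out = count_by_function_py_alt inv_rows
instance (inv_rows : Option (List (List String))) (out : List (String × Int)) : Decidable (Spec_count_by_function_py inv_rows out) := by unfold Spec_count_by_function_py; infer_instance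

-- ===== CLAIM (what is proved, stated in full; the proofs are below) =====
def Claim_equal_count_by_function_py : Prop := ∀ (inv_rows : Option (List (List String))), Dom_count_by_function_py inv_rows → Spec_count_by_function_py inv_rows (count_by_function_py inv_rows)

-- ===== LEMMAS AND PROOFS =====

-- A's dev_fun computation equals B's (pyGet? is none exactly when the index guard fails)
theorem pvDevFunU_eq : pvDevFunU = fun row => PySem.Str.upper ((PySem.List.pyGet? row 8).getD "") := by
  funext row
  unfold pvDevFunU
  by_cases h : 8 < row.length
  · simp [h]
  · simp [h, PySem.List.pyGet?, PySem.List.pyIdx?]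

-- one step of A's loop on the 4-key dict, per branch
theorem pvStepA_ap (a s m t : Int) (row : List String) (hap : PySem.Str.isIn "AP" (pvDevFunU row) = true) :
    pvStepA (PySem.Dict.mk [("AP", a), ("SW", s), ("MISC", m), ("TOTAL", t)]) row =
    PySem.Dict.mk [("AP", a + 1), ("SW", s), ("MISC", m), ("TOTAL", t + 1)] := by
  have hap' : PySem.Chars.isIn ['A','P'] (pvDevFunU row).toList = true := hap
  simp [pvStepA, hap', PySem.Str.isIn, PySem.Dict.insert, PySem.Dict.contains, PySem.Dict.getD, PySem.Dict.get?]

theorem pvStepA_sw (a s m t : Int) (row : List String)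
    (hap : PySem.Str.isIn "AP" (pvDevFunU row) = false) (hsw : PySem.Str.isIn "SW" (pvDevFunU row) = true) :
    pvStepA (PySem.Dict.mk [("AP", a), ("SW", s), ("MISC", m), ("TOTAL", t)]) row =
    PySem.Dict.mk [("AP", a), ("SW", s + 1), ("MISC", m), ("TOTAL", t + 1)] := by
  have hap' : PySem.Chars.isIn ['A','P'] (pvDevFunU row).toList = false := hap
  have hsw' : PySem.Chars.isIn ['S','W'] (pvDevFunU row).toList = true := hsw
  simp [pvStepA, hap', hsw', PySem.Str.isIn, PySem.Dict.insert, PySem.Dict.contains, PySem.Dict.getD, PySem.Dict.get?]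

theorem pvStepA_misc (a s m t : Int) (row : List String)
    (hap : PySem.Str.isIn "AP" (pvDevFunU row) = false) (hsw : PySem.Str.isIn "SW" (pvDevFunU row) = false) :
    pvStepA (PySem.Dict.mk [("AP", a), ("SW", s), ("MISC", m), ("TOTAL", t)]) row =
    PySem.Dict.mk [("AP", a), ("SW", s), ("MISC", m + 1), ("TOTAL", t + 1)] := by
  have hap' : PySem.Chars.isIn ['A','P'] (pvDevFunU row).toList = false := hap
  have hsw' : PySem.Chars.isIn ['S','W'] (pvDevFunU row).toList = false := hsw
  simp [pvStepA, hap', hsw', PySem.Str.isIn, PySem.Dict.insert, PySem.Dict.contains, PySem.Dict.getD, PySem.Dict.get?]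

-- loop invariant: A's fold over the 4-key dict computes B's filter counts
theorem pv_fold_inv (rows : List (List String)) (a s m t : Int) :
    rows.foldl pvStepA (PySem.Dict.mk [("AP", a), ("SW", s), ("MISC", m), ("TOTAL", t)]) =
    PySem.Dict.mk
      [("AP", a + ((rows.map pvDevFunU).filter (fun f => PySem.Str.isIn "AP" f)).length),
       ("SW", s + ((rows.map pvDevFunU).filter (fun f => PySem.Str.isIn "SW" f && !PySem.Str.isIn "AP" f)).length),
       ("MISC", m + ((rows.length : Int)
          - ((rows.map pvDevFunU).filter (fun f => PySem.Str.isIn "AP" f)).length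
          - ((rows.map pvDevFunU).filter (fun f => PySem.Str.isIn "SW" f && !PySem.Str.isIn "AP" f)).length)),
       ("TOTAL", t + rows.length)] := by
  induction rows generalizing a s m t with
  | nil => simp
  | cons row rest ih =>
    simp only [List.foldl_cons, List.map_cons, List.filter_cons, List.length_cons]
    by_cases hap : PySem.Str.isIn "AP" (pvDevFunU row)
    · rw [pvStepA_ap a s m t row hap, ih]
      have hap' : PySem.Chars.isIn ['A','P'] (pvDevFunU row).toList = true := hap
      simp [hap']
      omega
    · by_cases hsw : PySem.Str.isIn "SW" (pvDevFunU row)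
      · rw [pvStepA_sw a s m t row (by simpa using hap) hsw, ih]
        have hap' : PySem.Chars.isIn ['A','P'] (pvDevFunU row).toList = false := by simpa using hap
        have hsw' : PySem.Chars.isIn ['S','W'] (pvDevFunU row).toList = true := hsw
        simp [hap', hsw']
        omega
      · rw [pvStepA_misc a s m t row (by simpa using hap) (by simpa using hsw), ih]
        have hap' : PySem.Chars.isIn ['A','P'] (pvDevFunU row).toList = false := by simpa using hap
        have hsw' : PySem.Chars.isIn ['S','W'] (pvDevFunU row).toList = false := by simpa using hsw
        simp [hap', hsw']
        omega

-- ===== VERDICT (by name: the statement is the Claim_ definition above) =====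
theorem count_by_function_py_spec : Claim_equal_count_by_function_py := by
  intro inv_rows _
  unfold Spec_count_by_function_py count_by_function_py count_by_function_py_alt
  match inv_rows with
  | none => simp
  | some rows =>
    by_cases h : rows = []
    · subst h; simp
    · simp only [h, Option.getD_some, if_neg, not_false_iff]
      rw [pv_fold_inv, pvDevFunU_eq]
      simp
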